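-- pv_equiv track=rewrite | github.com/Logesh08/LeetCode-Diaries | problems/Vowel Spellchecker.py | spellchecker
-- ===== SOURCE A (Python) =====
-- from typing import List
-- from collections import defaultdict
--
-- def spellchecker(wordlist: List[str], queries: List[str]) -> List[str]:
--
--     def case_hash(s):
--         return s.lower()
--
--     def vowel_hash(s):
--         return s.lower().replace('e', 'a').replace('i', 'a').replace('o', 'a').replace('u', 'a')
--
--
--     exact = set(wordlist)
--     case = defaultdict()
--     vowl = defaultdict()
--     for w in wordlist:
--         c = case_hash(w)
--         if c not in case: case[c] = w
--         v = vowel_hash(w)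
--         if v not in vowl: vowl[v] = w
--
--     def correct(w):
--         if w in exact: return w
--         c = case_hash(w)
--         if c in case: return case[c]
--         v = vowel_hash(w)
--         if v in vowl: return vowl[v]
--         return ''
--
--     return [correct(q) for q in queries]
-- ===== SOURCE B (Python) =====
-- from typing import List
--
-- def spellchecker(wordlist: List[str], queries: List[str]) -> List[str]:
--
--     def vowel_hash(s):
--         return s.lower().replace('e', 'a').replace('i', 'a').replace('o', 'a').replace('u', 'a')
--
--     def correct(q):
--         for w in wordlist:
--             if w == q:
--                 return q
--         c = q.lower()
--         for w in wordlist: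
--             if w.lower() == c:
--                 return w
--         v = vowel_hash(q)
--         for w in wordlist:
--             if vowel_hash(w) == v:
--                 return w
--         return ''
--
--     return [correct(q) for q in queries]
-- ===== Notes on version B (the rewrite author's own statement) =====
-- stated objective: simpler
-- what changed: Replaces the precomputed exact-set and two first-wins hash maps with per-query direct scans of the wordlist (exact, then case-insensitive, then vowel-normalized), relying on first-occurrence order of the scan instead of cached dict entries.
import Mathlib
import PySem

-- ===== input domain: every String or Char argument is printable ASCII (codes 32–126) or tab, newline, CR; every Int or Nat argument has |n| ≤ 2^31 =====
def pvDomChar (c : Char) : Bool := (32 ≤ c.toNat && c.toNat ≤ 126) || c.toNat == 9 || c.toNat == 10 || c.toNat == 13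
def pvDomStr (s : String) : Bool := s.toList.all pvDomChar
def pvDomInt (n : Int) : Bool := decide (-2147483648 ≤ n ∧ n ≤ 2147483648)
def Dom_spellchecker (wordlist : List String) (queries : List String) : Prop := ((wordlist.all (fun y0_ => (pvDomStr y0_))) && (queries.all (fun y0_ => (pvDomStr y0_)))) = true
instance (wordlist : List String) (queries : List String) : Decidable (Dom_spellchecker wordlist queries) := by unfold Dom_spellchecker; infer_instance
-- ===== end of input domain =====

-- B replaces A's precomputed set + two first-wins dicts by three direct scans of the
-- wordlist per query (simpler; return value only, no mutation either way).

-- ===== PORT A =====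
def pvCaseHash (s : String) : String := PySem.Str.lower s

def pvVowelHash (s : String) : String :=
  PySem.Str.replace (PySem.Str.replace (PySem.Str.replace (PySem.Str.replace
    (PySem.Str.lower s) "e" "a") "i" "a") "o" "a") "u" "a"

def spellchecker (wordlist : List String) (queries : List String) : List String :=
  let exact : PySem.Set String := PySem.Set.ofList wordlist
  let tables : PySem.Dict String String × PySem.Dict String String :=
    wordlist.foldl (fun (p : PySem.Dict String String × PySem.Dict String String) w =>
      let case := if p.1.contains (pvCaseHash w) then p.1 else p.1.insert (pvCaseHash w) w
      let vowl := if p.2.contains (pvVowelHash w) then p.2 else p.2.insert (pvVowelHash w) w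
      (case, vowl)) (PySem.Dict.empty, PySem.Dict.empty)
  let correct : String → String := fun w =>
    if w ∈ exact then w
    else match tables.1.get? (pvCaseHash w) with
    | some x => x
    | none => match tables.2.get? (pvVowelHash w) with
      | some x => x
      | none => ""
  queries.map correct

-- ===== PORT B =====
def spellchecker_alt (wordlist : List String) (queries : List String) : List String :=
  let correct : String → String := fun q =>
    match wordlist.find? (fun w => w == q) with
    | some _ => q
    | none =>
      match wordlist.find? (fun w => pvCaseHash w == pvCaseHash q) with
      | some w => w
      | none =>
        match wordlist.find? (fun w => pvVowelHash w == pvVowelHash q) with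
        | some w => w
        | none => ""
  queries.map correct

-- ===== PRECONDITION & SPEC =====
def Spec_spellchecker (wordlist : List String) (queries : List String) (out : List String) : Prop := out = spellchecker_alt wordlist queries
instance (wordlist : List String) (queries : List String) (out : List String) : Decidable (Spec_spellchecker wordlist queries out) := by unfold Spec_spellchecker; infer_instance

-- ===== CLAIM (what is proved, stated in full; the proofs are below) =====
def Claim_equal_spellchecker : Prop := ∀ (wordlist : List String) (queries : List String), Dom_spellchecker wordlist queries → Spec_spellchecker wordlist queries (spellchecker wordlist queries)

-- ===== LEMMAS AND PROOFS =====

-- A dict built by an insert-if-absent loop answers get? with the FIRST list element whose key matches.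
theorem get?_foldl_insert_absent (h : String → String) (ws : List String)
    (d : PySem.Dict String String) (k : String) :
    (ws.foldl (fun d w => if d.contains (h w) then d else d.insert (h w) w) d).get? k
      = (d.get? k).or (ws.find? (fun w => h w == k)) := by
  induction ws generalizing d with
  | nil => simp
  | cons x ws ih =>
    simp only [List.foldl_cons, List.find?]
    by_cases hc : d.contains (h x)
    · rw [if_pos hc, ih]
      by_cases hk : h x == k
      · have : k = h x := (beq_iff_eq.mp hk).symm
        subst this
        have : (d.get? (h x)).isSome := by
          rw [← PySem.Dict.contains_eq_isSome_get?]; exact hc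
        obtain ⟨v, hv⟩ := Option.isSome_iff_exists.mp this
        simp [hv, Option.or]
      · simp [hk]
    · rw [if_neg hc, ih]
      have hnone : d.get? (h x) = none := by
        rw [PySem.Dict.get?_eq_none_iff_contains]
        exact Bool.not_eq_true _ ▸ (by simpa using hc)
      by_cases hk : h x == k
      · have : k = h x := (beq_iff_eq.mp hk).symm
        subst this
        simp [PySem.Dict.get?_insert_self, hnone, Option.or]
      · have hne : k ≠ h x := fun e => hk (beq_iff_eq.mpr e.symm)
        simp [hk, PySem.Dict.get?_insert_of_ne d x hne]

-- The pair-of-dicts loop is the two single-dict loops run side by side.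
theorem tables_fst (wordlist : List String)
    (c v : PySem.Dict String String) :
    (wordlist.foldl (fun (p : PySem.Dict String String × PySem.Dict String String) w =>
      ((if p.1.contains (pvCaseHash w) then p.1 else p.1.insert (pvCaseHash w) w),
       (if p.2.contains (pvVowelHash w) then p.2 else p.2.insert (pvVowelHash w) w))) (c, v))
      = (wordlist.foldl (fun d w => if d.contains (pvCaseHash w) then d else d.insert (pvCaseHash w) w) c,
         wordlist.foldl (fun d w => if d.contains (pvVowelHash w) then d else d.insert (pvVowelHash w) w) v) := by
  induction wordlist generalizing c v with
  | nil => rfl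
  | cons x ws ih => simp only [List.foldl_cons]; exact ih _ _

theorem correct_eq (wordlist : List String) (q : String) :
    (if q ∈ PySem.Set.ofList wordlist then q
     else match (wordlist.foldl (fun d w => if d.contains (pvCaseHash w) then d else d.insert (pvCaseHash w) w) PySem.Dict.empty).get? (pvCaseHash q) with
     | some x => x
     | none => match (wordlist.foldl (fun d w => if d.contains (pvVowelHash w) then d else d.insert (pvVowelHash w) w) PySem.Dict.empty).get? (pvVowelHash q) with
       | some x => x
       | none => "")
    = (match wordlist.find? (fun w => w == q) with
     | some _ => q
     | none =>
       match wordlist.find? (fun w => pvCaseHash w == pvCaseHash q) with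
       | some w => w
       | none =>
         match wordlist.find? (fun w => pvVowelHash w == pvVowelHash q) with
         | some w => w
         | none => "") := by
  rw [get?_foldl_insert_absent, get?_foldl_insert_absent]
  simp only [PySem.Dict.get?_empty, Option.or]
  by_cases hq : q ∈ wordlist
  · have h1 : q ∈ PySem.Set.ofList wordlist := by
      rw [PySem.Set.mem_ofList]; exact hq
    rw [if_pos h1]
    cases h : wordlist.find? (fun w => w == q) with
    | some w => rfl
    | none =>
      exact absurd (beq_self_eq_true q) (by simpa using List.find?_eq_none.mp h q hq)
  · have h1 : q ∉ PySem.Set.ofList wordlist := by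
      rw [PySem.Set.mem_ofList]; exact hq
    have h2 : wordlist.find? (fun w => w == q) = none := by
      rw [List.find?_eq_none]
      intro w hw hb
      exact hq ((beq_iff_eq.mp hb) ▸ hw)
    rw [if_neg h1, h2]

-- ===== VERDICT (by name: the statement is the Claim_ definition above) =====
theorem spellchecker_spec : Claim_equal_spellchecker := by
  intro wordlist queries _
  unfold Spec_spellchecker spellchecker spellchecker_alt
  simp only [tables_fst]
  exact List.map_congr_left (fun q _ => correct_eq wordlist q)
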